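-- pv_equiv track=rewrite | github.com/mike-a-yen/Kaggle | disaster_tweets/src/tokenizer.py | replace_repetitions
-- ===== SOURCE A (Python) =====
-- from typing import List
--
-- def replace_repetitions(tokens: List[str]) -> List[str]:
--     """Replace repeating tokens."""
--     if len(tokens) <= 1:
--         return tokens
--     new_tokens = []
--     slow, fast = 0, 1
--     reps = 0
--     while fast < len(tokens):
--         slow_token = tokens[slow]
--         fast_token = tokens[fast]
--         if fast_token == slow_token:
--             reps += 1
--             fast += 1
--             if fast == len(tokens):
--                 new_tokens += ['<rep>']
--         else:
--             if reps > 0: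
--                 new_tokens += ['<rep>', slow_token]
--                 slow = fast
--                 fast += 1
--                 reps = 0
--             else:
--                 new_tokens += [slow_token]
--                 slow += 1
--                 fast += 1
--     new_tokens.append(fast_token)
--     return new_tokens
-- ===== SOURCE B (Python) =====
-- from typing import List
--
-- def replace_repetitions(tokens: List[str]) -> List[str]:
--     """Replace repeating tokens."""
--     if len(tokens) <= 1:
--         return tokens
--     n = len(tokens)
--     # Stage 1: the positions that end a maximal run, by a local neighbor test.
--     ends = [i for i in range(n) if i == n - 1 or tokens[i] != tokens[i + 1]]
--     # Stage 2: emit; a run is repeated iff its end token equals its left neighbor.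
--     out = []
--     for i in ends:
--         if i > 0 and tokens[i] == tokens[i - 1]:
--             out.append('<rep>')
--         out.append(tokens[i])
--     return out
-- ===== Notes on version B (the rewrite author's own statement) =====
-- stated objective: alternative
-- what changed: Replaced A's two-pointer slow/fast/reps state machine with a stateless two-stage pass: first select run-end positions by a local neighbor comparison (tokens[i] != tokens[i+1] or last index), then emit each end token, prefixing '<rep>' exactly when it equals its left neighbor.
import Mathlib
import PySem

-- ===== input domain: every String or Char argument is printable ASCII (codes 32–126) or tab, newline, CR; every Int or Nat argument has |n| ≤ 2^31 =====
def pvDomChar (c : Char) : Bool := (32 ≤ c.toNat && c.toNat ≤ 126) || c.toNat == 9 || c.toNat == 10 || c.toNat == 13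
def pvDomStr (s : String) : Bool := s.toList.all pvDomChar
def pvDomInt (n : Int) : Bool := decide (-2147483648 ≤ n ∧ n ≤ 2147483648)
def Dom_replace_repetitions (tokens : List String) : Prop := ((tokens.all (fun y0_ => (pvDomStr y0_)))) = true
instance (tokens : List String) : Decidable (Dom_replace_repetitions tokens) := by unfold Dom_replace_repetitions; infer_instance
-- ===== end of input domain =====

-- B replaces A's two-pointer slow/fast/reps state machine by a stateless two-stage
-- pass: select run-end indices by local neighbor comparisons, then emit from them;
-- alternative decomposition, same cost, same return value.


-- ===== PORT A =====
-- The while-loop of A, with state (slow, fast, reps, fast_token, new_tokens).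
-- `ft` carries the Python loop variable `fast_token`, which is read after the loop;
-- the loop body runs at least once (len ≥ 2), so the initial dummy "" is never returned.
-- Indices slow/fast are always in range in A, so `getD … ""` is exact for tokens[slow]/tokens[fast].
def aLoop (tokens : List String) (slow fast reps : Nat) (ft : String) (acc : List String) :
    List String :=
  if _h : fast < tokens.length then
    let slow_token := tokens.getD slow ""
    let fast_token := tokens.getD fast ""
    if fast_token == slow_token then
      let acc' := if fast + 1 = tokens.length then acc ++ ["<rep>"] else acc
      aLoop tokens slow (fast + 1) (reps + 1) fast_token acc'
    else
      if reps > 0 then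
        aLoop tokens fast (fast + 1) 0 fast_token (acc ++ ["<rep>", slow_token])
      else
        aLoop tokens (slow + 1) (fast + 1) 0 fast_token (acc ++ [slow_token])
  else
    acc ++ [ft]
termination_by tokens.length - fast

def replace_repetitions (tokens : List String) : List String :=
  if tokens.length ≤ 1 then tokens
  else aLoop tokens 0 1 0 "" []

-- ===== PORT B =====
-- Stage 1: indices ending a maximal run (`i == n-1 or tokens[i] != tokens[i+1]`).
-- All index accesses are in range in Source B (the `or` short-circuits), so `getD … ""` is exact.
def bEnds (tokens : List String) : List Nat :=
  (List.range tokens.length).filter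
    (fun i => i == tokens.length - 1 || !(tokens.getD i "" == tokens.getD (i + 1) ""))

-- Stage 2: emission for one run-end index (`'<rep>'` prefix iff equal to left neighbor).
def bEmit (tokens : List String) (i : Nat) : List String :=
  if decide (0 < i) && (tokens.getD i "" == tokens.getD (i - 1) "") then
    ["<rep>", tokens.getD i ""]
  else
    [tokens.getD i ""]

def replace_repetitions_alt (tokens : List String) : List String :=
  if tokens.length ≤ 1 then tokens
  else (bEnds tokens).flatMap (bEmit tokens)

-- ===== PRECONDITION & SPEC =====
def Spec_replace_repetitions (tokens : List String) (out : List String) : Prop := out = replace_repetitions_alt tokens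
instance (tokens : List String) (out : List String) : Decidable (Spec_replace_repetitions tokens out) := by unfold Spec_replace_repetitions; infer_instance

-- ===== CLAIM (what is proved, stated in full; the proofs are below) =====
def Claim_equal_replace_repetitions : Prop := ∀ (tokens : List String), Dom_replace_repetitions tokens → Spec_replace_repetitions tokens (replace_repetitions tokens)

-- ===== LEMMAS AND PROOFS =====

-- Proof-side middle form: the run-length view both ports are reduced to.
def altGroups (tokens : List String) : List String :=
  match tokens with
  | [] => []
  | t :: rest =>
    let run := rest.takeWhile (fun x => x == t)
    let rest' := rest.dropWhile (fun x => x == t)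
    if run.length + 1 > 1 then "<rep>" :: t :: altGroups rest'
    else t :: altGroups rest'
termination_by tokens.length
decreasing_by
  all_goals
    simp only [List.length_cons]
    exact Nat.lt_succ_of_le (List.length_dropWhile_le (fun x => x == t) rest)

-- takeWhile/dropWhile split a replicate-prefixed list at the run boundary
lemma tw_dw_replicate (t : String) (m : Nat) (rest : List String)
    (h : ∀ y, rest.head? = some y → (y == t) = false) :
    (List.replicate m t ++ rest).takeWhile (fun x => x == t) = List.replicate m t ∧
    (List.replicate m t ++ rest).dropWhile (fun x => x == t) = rest := by
  induction m with
  | zero =>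
    simp only [List.replicate, List.nil_append]
    cases rest with
    | nil => simp
    | cons y ys => simp [List.takeWhile, List.dropWhile, h y rfl]
  | succ n ih =>
    simp only [List.replicate_succ, List.cons_append, List.takeWhile, List.dropWhile,
      beq_self_eq_true, ih]
    exact ⟨trivial, trivial⟩

-- altGroups on a maximal run of length k followed by rest not starting with t
lemma altGroups_run (t : String) (k : Nat) (rest : List String) (hk : 1 ≤ k)
    (h : ∀ y, rest.head? = some y → (y == t) = false) :
    altGroups (List.replicate k t ++ rest)
      = (if 2 ≤ k then ["<rep>", t] else [t]) ++ altGroups rest := by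
  obtain ⟨m, rfl⟩ : ∃ m, k = m + 1 := ⟨k - 1, (Nat.succ_pred_eq_of_pos hk).symm⟩
  have hsplit := tw_dw_replicate t m rest h
  rw [List.replicate_succ, List.cons_append, altGroups]
  simp only [hsplit.1, hsplit.2, List.length_replicate]
  rcases m with _ | m
  · simp
  · simp

lemma drop_lt (tokens : List String) (i : Nat) (h : i < tokens.length) :
    tokens.drop i = tokens.getD i "" :: tokens.drop (i + 1) := by
  rw [List.drop_eq_getElem_cons h, List.getD_eq_getElem _ _ h]

-- Loop invariant for A: with [slow, fast) a run of tokens[slow] of length reps + 1,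
-- the loop produces acc ++ altGroups (tokens.drop slow).
lemma aLoop_eq (tokens : List String) :
    ∀ n slow fast reps (ft : String) (acc : List String),
      tokens.length - fast = n →
      slow + reps + 1 = fast →
      slow < tokens.length →
      fast < tokens.length →
      tokens.drop slow
        = List.replicate (fast - slow) (tokens.getD slow "") ++ tokens.drop fast →
      aLoop tokens slow fast reps ft acc = acc ++ altGroups (tokens.drop slow) := by
  intro n
  induction n with
  | zero => intro slow fast reps ft acc hn _ _ hfast _; omega
  | succ n ih =>
    intro slow fast reps ft acc hn hsf hslow hfast hdrop
    set t := tokens.getD slow "" with ht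
    have hdropf := drop_lt tokens fast hfast
    rw [aLoop]
    simp only [dif_pos hfast]
    by_cases heq : (tokens.getD fast "" == t) = true
    · -- equal branch
      have heq' : tokens.getD fast "" = t := by simpa using heq
      have hdrop' : tokens.drop slow
          = List.replicate (fast + 1 - slow) t ++ tokens.drop (fast + 1) := by
        rw [hdrop, hdropf, heq']
        have : fast + 1 - slow = (fast - slow) + 1 := by omega
        rw [this, List.replicate_succ']
        simp
      simp only [← ht, heq, if_true]
      by_cases hend : fast + 1 = tokens.length
      · rw [if_pos hend, aLoop]
        have : ¬ (fast + 1 < tokens.length) := by omega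
        simp only [dif_neg this]
        have hrest : tokens.drop (fast + 1) = [] := by
          rw [List.drop_eq_nil_iff]; omega
        have hrun : altGroups (tokens.drop slow) = ["<rep>", t] := by
          rw [hdrop', hrest, List.append_nil]
          have := altGroups_run t (fast + 1 - slow) [] (by omega) (by intro y hy; simp at hy)
          simp only [List.append_nil] at this
          rw [this, if_pos (by omega)]
          simp [altGroups]
        rw [hrun, heq']
        simp
      · rw [if_neg hend]
        rw [ih slow (fast + 1) (reps + 1) _ acc (by omega) (by omega) hslow (by omega) hdrop']
    · -- different token: the run [slow, fast) is maximal
      have hne : ∀ y, (tokens.drop fast).head? = some y → (y == t) = false := by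
        intro y hy
        rw [hdropf] at hy
        simp only [List.head?_cons, Option.some.injEq] at hy
        subst hy
        simpa using heq
      have hrun := altGroups_run t (fast - slow) (tokens.drop fast) (by omega) hne
      rw [← hdrop] at hrun
      simp only [← ht, heq, if_false, Bool.false_eq_true]
      by_cases hreps : reps > 0
      · rw [if_pos hreps]
        have h2 : 2 ≤ fast - slow := by omega
        rw [hrun, if_pos h2]
        by_cases hend : fast + 1 = tokens.length
        · rw [aLoop]
          have hlt : ¬ (fast + 1 < tokens.length) := by omega
          simp only [dif_neg hlt]
          have hrest : tokens.drop (fast + 1) = [] := by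
            rw [List.drop_eq_nil_iff]; omega
          have : altGroups (tokens.drop fast) = [tokens.getD fast ""] := by
            rw [hdropf, hrest]; simp [altGroups]
          rw [this]; simp
        · have hdropf' : tokens.drop fast
              = List.replicate (fast + 1 - fast) (tokens.getD fast "") ++ tokens.drop (fast + 1) := by
            rw [hdropf]; simp
          rw [ih fast (fast + 1) 0 _ _ (by omega) (by omega) hfast (by omega) hdropf']
          simp
      · rw [if_neg hreps]
        have h1 : fast - slow = 1 := by omega
        rw [hrun, if_neg (by omega)]
        have hslow1 : slow + 1 = fast := by omega
        by_cases hend : fast + 1 = tokens.length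
        · rw [aLoop]
          have hlt : ¬ (fast + 1 < tokens.length) := by omega
          simp only [dif_neg hlt]
          have hrest : tokens.drop (fast + 1) = [] := by
            rw [List.drop_eq_nil_iff]; omega
          have : altGroups (tokens.drop fast) = [tokens.getD fast ""] := by
            rw [hdropf, hrest]; simp [altGroups]
          rw [this]; simp
        · have hdropf' : tokens.drop fast
              = List.replicate (fast + 1 - fast) (tokens.getD fast "") ++ tokens.drop (fast + 1) := by
            rw [hdropf]; simp
          rw [hslow1, ih fast (fast + 1) 0 _ _ (by omega) (by omega) hfast (by omega) hdropf']
          simp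

-- flatMap respects pointwise-on-members equality
lemma flatMap_congr_mem {α β : Type} (l : List α) (f g : α → List β)
    (h : ∀ x ∈ l, f x = g x) : l.flatMap f = l.flatMap g := by
  induction l with
  | nil => rfl
  | cons a l ih =>
    simp only [List.flatMap_cons, h a (List.mem_cons_self),
      ih (fun x hx => h x (List.mem_cons_of_mem a hx))]

lemma getD_rep_left (t : String) (k : Nat) (rest : List String) (i : Nat) (hi : i < k) :
    (List.replicate k t ++ rest).getD i "" = t := by
  rw [List.getD_append _ _ _ _ (by simpa using hi),
    List.getD_eq_getElem _ _ (by simpa using hi), List.getElem_replicate]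

lemma getD_rep_right (t : String) (k : Nat) (rest : List String) (j : Nat) :
    (List.replicate k t ++ rest).getD (k + j) "" = rest.getD j "" := by
  rw [List.getD_append_right _ _ _ _ (by simp)]
  simp

-- peeling one maximal run off B's two staged passes
lemma flat_run (L : List String) (t : String) (k m : Nat) (rest : List String)
    (hL : L = List.replicate k t ++ rest) (hk : 1 ≤ k) (hm : m = rest.length)
    (hhead : ∀ y, rest.head? = some y → (y == t) = false) :
    (bEnds L).flatMap (bEmit L)
      = (if 2 ≤ k then ["<rep>", t] else [t]) ++ (bEnds rest).flatMap (bEmit rest) := by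
  have hlen : L.length = k + m := by rw [hL, hm]; simp
  have hgetL : ∀ i, i < k → L.getD i "" = t := by
    intro i hi; rw [hL]; exact getD_rep_left t k rest i hi
  have hgetR : ∀ j, L.getD (k + j) "" = rest.getD j "" := by
    intro j; rw [hL]; exact getD_rep_right t k rest j
  have hhead' : ∀ hm0 : 0 < m, (rest.getD 0 "" == t) = false := by
    intro hm0
    have hne : rest ≠ [] := by intro h; rw [h] at hm; simp at hm; omega
    obtain ⟨z, zs, rfl⟩ := List.exists_cons_of_ne_nil hne
    simpa using hhead z rfl
  have hrange : List.range L.length = List.range k ++ (List.range m).map (fun j => k + j) := by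
    rw [hlen, List.range_add]
  have hfiltL : (List.range k).filter
      (fun i => i == L.length - 1 || !(L.getD i "" == L.getD (i + 1) "")) = [k - 1] := by
    obtain ⟨k', rfl⟩ : ∃ k', k = k' + 1 := ⟨k - 1, by omega⟩
    rw [List.range_succ, List.filter_append]
    have h1 : (List.range k').filter
        (fun i => i == L.length - 1 || !(L.getD i "" == L.getD (i + 1) "")) = [] := by
      apply List.filter_eq_nil_iff.mpr
      intro i hiM
      have hi : i < k' := List.mem_range.mp hiM
      simp only [Bool.not_eq_true, Bool.or_eq_false_iff]
      constructor
      · have : i ≠ L.length - 1 := by rw [hlen]; omega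
        simpa using this
      · rw [hgetL i (by omega), hgetL (i + 1) (by omega)]
        simp
    have hpk : ((k' : Nat) == L.length - 1 || !(L.getD k' "" == L.getD (k' + 1) "")) = true := by
      rcases Nat.eq_zero_or_pos m with hm0 | hmpos
      · have : k' = L.length - 1 := by rw [hlen]; omega
        simp [this]
      · apply Bool.or_eq_true_iff.mpr
        right
        rw [hgetL k' (by omega)]
        have hR0 : L.getD (k' + 1) "" = rest.getD 0 "" := hgetR 0
        rw [hR0]
        have hne := hhead' hmpos
        have hne' : (t == rest.getD 0 "") = false := by
          rw [beq_eq_false_iff_ne] at hne ⊢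
          exact fun h => hne h.symm
        rw [hne']
        rfl
    rw [h1, List.filter_cons, if_pos hpk]
    simp
  have hemitL : bEmit L (k - 1) = (if 2 ≤ k then ["<rep>", t] else [t]) := by
    rw [bEmit, hgetL (k - 1) (by omega)]
    rcases Nat.lt_or_ge k 2 with hk2 | hk2
    · have : k = 1 := by omega
      simp [this]
    · have h2 : L.getD (k - 1 - 1) "" = t := hgetL _ (by omega)
      rw [h2]
      simp only [beq_self_eq_true, Bool.and_true]
      rw [if_pos (by simpa using (show 0 < k - 1 by omega)), if_pos hk2]
  have hpshift : ∀ j ∈ List.range m,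
      ((fun i => i == L.length - 1 || !(L.getD i "" == L.getD (i + 1) "")) ∘ (fun j => k + j)) j
        = (fun j => j == rest.length - 1 || !(rest.getD j "" == rest.getD (j + 1) "")) j := by
    intro j hjM
    have hj : j < m := List.mem_range.mp hjM
    simp only [Function.comp_apply]
    have h1 : ((k + j : Nat) == L.length - 1) = (j == rest.length - 1) := by
      rw [hlen]
      by_cases hje : j = m - 1
      · subst hje
        have hl : k + (m - 1) = k + m - 1 := by omega
        rw [hl]
        simp [hm]
      · have hx : k + j ≠ k + m - 1 := by omega
        have h2 : j ≠ rest.length - 1 := by rw [← hm]; omega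
        simp [hx, h2]
    have hj1 : k + j + 1 = k + (j + 1) := by omega
    rw [h1, hgetR j, hj1, hgetR (j + 1)]
  have hemitR : ∀ j, j < m → bEmit L (k + j) = bEmit rest j := by
    intro j hj
    rw [bEmit, bEmit, hgetR j]
    rcases Nat.eq_zero_or_pos j with hj0 | hjpos
    · subst hj0
      have hkj : k + 0 - 1 = k - 1 := by omega
      rw [hkj, hgetL (k - 1) (by omega), hhead' hj]
      simp
    · have hx : k + j - 1 = k + (j - 1) := by omega
      rw [hx, hgetR (j - 1)]
      have h01 : (decide (0 < k + j)) = (decide (0 < j)) := by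
        simp [Nat.lt_of_lt_of_le hjpos (Nat.le_add_left j k), hjpos]
      rw [h01]
  rw [bEnds, hrange, List.filter_append, List.flatMap_append, hfiltL, List.filter_map]
  have hleft : ([k - 1] : List Nat).flatMap (bEmit L)
      = (if 2 ≤ k then ["<rep>", t] else [t]) := by
    simp [hemitL]
  rw [hleft, List.filter_congr hpshift, List.flatMap_map]
  congr 1
  rw [flatMap_congr_mem _ _ (bEmit rest)
    (fun j hj => hemitR j (List.mem_range.mp (List.mem_of_mem_filter hj)))]
  rw [bEnds, hm]

-- B's two staged passes compute altGroups.
lemma flat_eq_altGroups :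
    ∀ (n : Nat) (tokens : List String), tokens.length ≤ n →
      (bEnds tokens).flatMap (bEmit tokens) = altGroups tokens := by
  intro n
  induction n with
  | zero =>
    intro tokens h
    have : tokens = [] := by cases tokens <;> simp_all
    subst this
    simp [bEnds, altGroups]
  | succ n ih =>
    intro tokens hlen
    match tokens with
    | [] => simp [bEnds, altGroups]
    | t :: rest =>
      have hrun_rep : rest.takeWhile (fun x => x == t)
          = List.replicate (rest.takeWhile (fun x => x == t)).length t := by
        apply List.eq_replicate_of_mem
        intro b hb
        have := List.mem_takeWhile_imp hb
        simpa using this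
      have hhead : ∀ y, (rest.dropWhile (fun x => x == t)).head? = some y → (y == t) = false := by
        intro y hy
        cases hre : rest.dropWhile (fun x => x == t) with
        | nil => rw [hre] at hy; simp at hy
        | cons z zs =>
          rw [hre] at hy
          simp only [List.head?_cons, Option.some.injEq] at hy
          subst hy
          have hnn : rest.dropWhile (fun x => x == t) ≠ [] := by rw [hre]; simp
          have := List.head_dropWhile_not (fun x => x == t) hnn
          simpa [hre] using this
      have htl : t :: rest
          = List.replicate ((rest.takeWhile (fun x => x == t)).length + 1) t
              ++ rest.dropWhile (fun x => x == t) := by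
        rw [List.replicate_succ, List.cons_append]
        conv_lhs => rw [← List.takeWhile_append_dropWhile (p := fun x => x == t) (l := rest)]
        rw [← hrun_rep]
      have hrest'le : (rest.dropWhile (fun x => x == t)).length ≤ n := by
        have := List.length_dropWhile_le (fun x => x == t) rest
        simp only [List.length_cons] at hlen
        omega
      rw [flat_run (t :: rest) t ((rest.takeWhile (fun x => x == t)).length + 1)
        (rest.dropWhile (fun x => x == t)).length (rest.dropWhile (fun x => x == t))
        htl (by omega) rfl hhead]
      rw [ih _ hrest'le]
      rw [htl, altGroups_run t _ _ (by omega) hhead]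

-- ===== VERDICT (by name: the statement is the Claim_ definition above) =====
theorem replace_repetitions_spec : Claim_equal_replace_repetitions := by
  intro tokens _
  unfold Spec_replace_repetitions replace_repetitions replace_repetitions_alt
  by_cases h : tokens.length ≤ 1
  · rw [if_pos h, if_pos h]
  · rw [if_neg h, if_neg h]
    have hA := aLoop_eq tokens (tokens.length - 1) 0 1 0 "" []
      (by omega) (by omega) (by omega) (by omega)
      (by
        have h0 := drop_lt tokens 0 (by omega)
        rw [List.drop_zero] at h0
        simpa using h0)
    rw [hA, flat_eq_altGroups tokens.length tokens (le_refl _)]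
    simp
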